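-- pv_equiv track=rewrite | github.com/ingann/DSA-course | Exercise pack 3/samebit.py | count
-- ===== SOURCE A (Python) =====
-- def count(s):
--     zeros = 0
--     ones = 0
--
--     for bit in s:
--         if bit == "0":
--             zeros += 1
--         else:
--             ones += 1
--
--     return counter(zeros)+counter(ones)
--
-- def counter(n):
--     counts = 0
--     n -= 1
--     while n > 0:
--         counts += n
--         n -= 1
--     return counts
-- ===== SOURCE B (Python) =====
-- def count(s):
--     zeros = 0
--     ones = 0
--     for bit in s:
--         if bit == "0":
--             zeros += 1
--         else:
--             ones += 1
--     return zeros * (zeros - 1) // 2 + ones * (ones - 1) // 2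
-- ===== Notes on version B (the rewrite author's own statement) =====
-- stated objective: simpler
-- what changed: Replaces the iterative `counter` helper (a while-loop summing n-1, n-2, ..., 1) with the closed-form triangular number n*(n-1)//2, keeping the single counting pass over s.
import Mathlib
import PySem

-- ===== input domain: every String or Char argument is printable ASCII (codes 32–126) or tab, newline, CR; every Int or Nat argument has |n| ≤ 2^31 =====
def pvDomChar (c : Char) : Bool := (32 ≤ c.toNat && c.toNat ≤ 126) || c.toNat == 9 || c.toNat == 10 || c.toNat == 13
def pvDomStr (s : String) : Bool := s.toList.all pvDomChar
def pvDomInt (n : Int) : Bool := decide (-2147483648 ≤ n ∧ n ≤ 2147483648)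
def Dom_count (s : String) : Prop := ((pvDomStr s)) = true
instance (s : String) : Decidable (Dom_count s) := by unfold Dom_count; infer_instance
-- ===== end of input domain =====

-- B replaces A's iterative `counter` while-loop by the closed-form n*(n-1)//2 (simpler; same counting pass over s).

-- ===== PORT A =====
-- `while n > 0: counts += n; n -= 1` of A's helper `counter`, after the initial `n -= 1`
def counterLoop (n counts : Int) : Int :=
  if n > 0 then counterLoop (n - 1) (counts + n) else counts
termination_by n.toNat
decreasing_by omega

def counterA (n : Int) : Int := counterLoop (n - 1) 0

def count (s : String) : Int :=
  let p := s.toList.foldl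
    (fun (p : Int × Int) bit => if bit == '0' then (p.1 + 1, p.2) else (p.1, p.2 + 1))
    (0, 0)
  counterA p.1 + counterA p.2

-- ===== PORT B =====
def count_alt (s : String) : Int :=
  let p := s.toList.foldl
    (fun (p : Int × Int) bit => if bit == '0' then (p.1 + 1, p.2) else (p.1, p.2 + 1))
    (0, 0)
  PySem.Int.floordiv (p.1 * (p.1 - 1)) 2 + PySem.Int.floordiv (p.2 * (p.2 - 1)) 2

-- ===== PRECONDITION & SPEC =====
def Spec_count (s : String) (out : Int) : Prop := out = count_alt s
instance (s : String) (out : Int) : Decidable (Spec_count s out) := by unfold Spec_count; infer_instance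

-- ===== CLAIM (what is proved, stated in full; the proofs are below) =====
def Claim_equal_count : Prop := ∀ (s : String), Dom_count s → Spec_count s (count s)

-- ===== LEMMAS AND PROOFS =====

theorem counterLoop_eq (k : Nat) : ∀ (c : Int), 2 * counterLoop (k : Int) c = 2 * c + k * (k + 1) := by
  induction k with
  | zero => intro c; unfold counterLoop; simp
  | succ m ih =>
    intro c
    unfold counterLoop
    have hk : ((m + 1 : Nat) : Int) > 0 := by positivity
    rw [if_pos hk]
    have h1 : ((m + 1 : Nat) : Int) - 1 = (m : Int) := by push_cast; ring
    rw [h1, ih]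
    push_cast
    ring

theorem counterA_eq (n : Nat) : counterA (n : Int) = PySem.Int.floordiv ((n : Int) * ((n : Int) - 1)) 2 := by
  rw [PySem.Int.floordiv_eq_ediv_of_pos (by omega)]
  cases n with
  | zero => unfold counterA counterLoop; simp
  | succ m =>
    unfold counterA
    have h1 : ((m + 1 : Nat) : Int) - 1 = (m : Int) := by push_cast; ring
    rw [h1]
    have hL := counterLoop_eq m 0
    have h2 : ((m + 1 : Nat) : Int) * (m : Int) = 2 * counterLoop (m : Int) 0 := by
      push_cast at hL ⊢
      linear_combination -hL
    rw [h2, Int.mul_ediv_cancel_left _ two_ne_zero]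

theorem fold_nonneg (l : List Char) : ∀ (a b : Int), 0 ≤ a → 0 ≤ b →
    0 ≤ (l.foldl (fun (p : Int × Int) bit => if bit == '0' then (p.1 + 1, p.2) else (p.1, p.2 + 1)) (a, b)).1 ∧
    0 ≤ (l.foldl (fun (p : Int × Int) bit => if bit == '0' then (p.1 + 1, p.2) else (p.1, p.2 + 1)) (a, b)).2 := by
  induction l with
  | nil => intro a b ha hb; exact ⟨ha, hb⟩
  | cons c t ih =>
    intro a b ha hb
    simp only [List.foldl_cons]
    by_cases h : c == '0' <;> simp only [h, Bool.false_eq_true, if_false, if_true]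
    · exact ih (a + 1) b (by omega) hb
    · exact ih a (b + 1) ha (by omega)

-- ===== VERDICT (by name: the statement is the Claim_ definition above) =====
theorem count_spec : Claim_equal_count := by
  intro s _
  unfold Spec_count
  simp only [count, count_alt]
  obtain ⟨h1, h2⟩ := fold_nonneg s.toList 0 0 (le_refl 0) (le_refl 0)
  obtain ⟨z, hz⟩ := Int.eq_ofNat_of_zero_le h1
  obtain ⟨o, ho⟩ := Int.eq_ofNat_of_zero_le h2
  rw [hz, ho, counterA_eq z, counterA_eq o]
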